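-- pv_equiv track=rewrite | github.com/ayan-goel/os-from-scratch | tools/phase7_compare.py | adaptation_metrics
-- ===== SOURCE A (Python) =====
-- def workload_pid(records):
--     for _, p, ev in records:
--         if ev == "SPAWN" and p != 0:
--             return p
--     return None
--
-- def adaptation_metrics(records):
--     """Bursts-to-adapt for flipper. Returns (bursts_to_long, first_long_length).
--
--     Bursts-to-adapt = 1-indexed position of the first post-phase-change
--     burst whose length is >= 5 ticks. None if never reached.
--     """
--     pid = workload_pid(records)
--     if pid is None:
--         return None, None
--     flip = [(t, ev) for (t, p, ev) in records if p == pid]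
--     # Locate first PREEMPT after at least one SLEEP — the phase change.
--     saw_sleep = False
--     change_idx = None
--     for i, (_, ev) in enumerate(flip):
--         if ev == "SLEEP":
--             saw_sleep = True
--         elif ev == "PREEMPT" and saw_sleep:
--             change_idx = i
--             break
--     if change_idx is None:
--         return None, None
--     bursts = []
--     open_t = None
--     for t, ev in flip[change_idx:]:
--         if ev == "RUN":
--             open_t = t
--         elif ev in ("PREEMPT", "SLEEP", "EXIT", "YIELD"):
--             if open_t is not None:
--                 bursts.append(t - open_t)
--                 open_t = None
--     for i, b in enumerate(bursts):
--         if b >= 5: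
--             return i + 1, b
--     return None, None
-- ===== SOURCE B (Python) =====
-- def adaptation_metrics(records):
--     """Bursts-to-adapt for flipper, as a single fused state-machine pass."""
--     pid = next((p for _, p, ev in records if ev == "SPAWN" and p != 0), None)
--     if pid is None:
--         return None, None
--     saw_sleep = False
--     measuring = False
--     open_t = None
--     count = 0
--     for t, p, ev in records:
--         if p != pid:
--             continue
--         if not measuring:
--             if ev == "SLEEP":
--                 saw_sleep = True
--             elif ev == "PREEMPT" and saw_sleep:
--                 measuring = True  # the change event itself closes no burst
--         elif ev == "RUN":
--             open_t = t
--         elif ev in ("PREEMPT", "SLEEP", "EXIT", "YIELD") and open_t is not None: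
--             count += 1
--             if t - open_t >= 5:
--                 return count, t - open_t
--             open_t = None
--     return None, None
-- ===== Notes on version B (the rewrite author's own statement) =====
-- stated objective: simpler
-- what changed: Replaces A's four separate passes (filter to flip, index-hunting change scan, burst-list construction, final enumerate scan) by one fused state-machine pass over the records that counts closed bursts and returns as soon as one reaches length 5, building no intermediate lists.
import Mathlib
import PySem

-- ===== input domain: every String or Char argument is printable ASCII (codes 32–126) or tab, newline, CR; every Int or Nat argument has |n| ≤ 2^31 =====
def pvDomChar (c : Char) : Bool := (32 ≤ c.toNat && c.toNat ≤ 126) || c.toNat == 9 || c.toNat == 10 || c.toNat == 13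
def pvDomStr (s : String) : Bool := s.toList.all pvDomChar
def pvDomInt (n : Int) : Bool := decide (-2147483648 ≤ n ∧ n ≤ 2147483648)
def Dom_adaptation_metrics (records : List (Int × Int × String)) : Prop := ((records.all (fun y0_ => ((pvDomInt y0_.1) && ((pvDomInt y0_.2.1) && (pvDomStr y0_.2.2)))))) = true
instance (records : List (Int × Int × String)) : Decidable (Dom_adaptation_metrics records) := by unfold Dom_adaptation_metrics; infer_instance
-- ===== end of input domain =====

-- B replaces A's four passes (flip list, change-index scan, burst-list build, final scan)
-- by one fused state-machine pass; simpler decomposition, return values only (no mutation).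

-- ===== PORT A =====
def workload_pid (records : List (Int × Int × String)) : Option Int :=
  match records with
  | [] => none
  | (_, p, ev) :: rest => if ev = "SPAWN" ∧ p ≠ 0 then some p else workload_pid rest

-- first PREEMPT after at least one SLEEP, 0-based index (enumerate counter carried as Nat)
def findChange : List (Int × String) → Nat → Bool → Option Nat
  | [], _, _ => none
  | (_, ev) :: rest, i, saw =>
    if ev = "SLEEP" then findChange rest (i + 1) true
    else if ev = "PREEMPT" ∧ saw then some i
    else findChange rest (i + 1) saw

def burstsLoop : List (Int × String) → Option Int → List Int → List Int
  | [], _, acc => acc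
  | (t, ev) :: rest, open_t, acc =>
    if ev = "RUN" then burstsLoop rest (some t) acc
    else if ev = "PREEMPT" ∨ ev = "SLEEP" ∨ ev = "EXIT" ∨ ev = "YIELD" then
      match open_t with
      | some o => burstsLoop rest none (acc ++ [t - o])
      | none => burstsLoop rest none acc
    else burstsLoop rest open_t acc

def firstLong : List Int → Int → Option Int × Option Int
  | [], _ => (none, none)
  | b :: rest, i => if b ≥ 5 then (some (i + 1), some b) else firstLong rest (i + 1)

def adaptation_metrics (records : List (Int × Int × String)) : Option Int × Option Int :=
  match workload_pid records with
  | none => (none, none)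
  | some pid =>
    let flip := (records.filter (fun r => r.2.1 = pid)).map (fun r => (r.1, r.2.2))
    match findChange flip 0 false with
    | none => (none, none)
    | some ci => firstLong (burstsLoop (flip.drop ci) none []) 0

-- ===== PORT B =====
-- measuring phase of the fused pass: open/close bursts, early return at the first long burst
def goMeasure (pid : Int) : List (Int × Int × String) → Option Int → Int → Option Int × Option Int
  | [], _, _ => (none, none)
  | (t, p, ev) :: rest, open_t, count =>
    if p ≠ pid then goMeasure pid rest open_t count
    else if ev = "RUN" then goMeasure pid rest (some t) count
    else if ev = "PREEMPT" ∨ ev = "SLEEP" ∨ ev = "EXIT" ∨ ev = "YIELD" then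
      match open_t with
      | some o =>
        if t - o ≥ 5 then (some (count + 1), some (t - o))
        else goMeasure pid rest none (count + 1)
      | none => goMeasure pid rest open_t count
    else goMeasure pid rest open_t count

def goPre (pid : Int) : List (Int × Int × String) → Bool → Option Int × Option Int
  | [], _ => (none, none)
  | (t, p, ev) :: rest, saw =>
    if p ≠ pid then goPre pid rest saw
    else if ev = "SLEEP" then goPre pid rest true
    else if ev = "PREEMPT" ∧ saw then goMeasure pid rest none 0
    else goPre pid rest saw

def adaptation_metrics_alt (records : List (Int × Int × String)) : Option Int × Option Int :=
  match (records.find? (fun r => decide (r.2.2 = "SPAWN" ∧ r.2.1 ≠ 0))).map (fun r => r.2.1) with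
  | none => (none, none)
  | some pid => goPre pid records false

-- ===== PRECONDITION & SPEC =====
def Spec_adaptation_metrics (records : List (Int × Int × String)) (out : Option Int × Option Int) : Prop := out = adaptation_metrics_alt records
instance (records : List (Int × Int × String)) (out : Option Int × Option Int) : Decidable (Spec_adaptation_metrics records out) := by unfold Spec_adaptation_metrics; infer_instance

-- ===== CLAIM (what is proved, stated in full; the proofs are below) =====
def Claim_equal_adaptation_metrics : Prop := ∀ (records : List (Int × Int × String)), Dom_adaptation_metrics records → Spec_adaptation_metrics records (adaptation_metrics records)

-- ===== LEMMAS AND PROOFS =====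

-- the two pid searches agree
theorem workload_pid_eq (records : List (Int × Int × String)) :
    workload_pid records = (records.find? (fun r => decide (r.2.2 = "SPAWN" ∧ r.2.1 ≠ 0))).map (fun r => r.2.1) := by
  induction records with
  | nil => rfl
  | cons r rest ih =>
    obtain ⟨t, p, ev⟩ := r
    by_cases h : ev = "SPAWN" ∧ p ≠ 0 <;> simp [workload_pid, List.find?, h, ih]

-- A's flip list as a function; goMeasure'/goPre' are B's two phases seen over the flip list
def flipOf (pid : Int) (records : List (Int × Int × String)) : List (Int × String) :=
  (records.filter (fun r => r.2.1 = pid)).map (fun r => (r.1, r.2.2))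

theorem flipOf_cons (pid t p ev) (rest : List (Int × Int × String)) :
    flipOf pid ((t, p, ev) :: rest) =
      if p = pid then (t, ev) :: flipOf pid rest else flipOf pid rest := by
  by_cases h : p = pid <;> simp [flipOf, List.filter, h]

def goMeasure' : List (Int × String) → Option Int → Int → Option Int × Option Int
  | [], _, _ => (none, none)
  | (t, ev) :: rest, open_t, count =>
    if ev = "RUN" then goMeasure' rest (some t) count
    else if ev = "PREEMPT" ∨ ev = "SLEEP" ∨ ev = "EXIT" ∨ ev = "YIELD" then
      match open_t with
      | some o =>
        if t - o ≥ 5 then (some (count + 1), some (t - o))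
        else goMeasure' rest none (count + 1)
      | none => goMeasure' rest open_t count
    else goMeasure' rest open_t count

def goPre' : List (Int × String) → Bool → Option Int × Option Int
  | [], _ => (none, none)
  | (t, ev) :: rest, saw =>
    if ev = "SLEEP" then goPre' rest true
    else if ev = "PREEMPT" ∧ saw then goMeasure' rest none 0
    else goPre' rest saw

theorem goMeasure_fuse (pid : Int) (records : List (Int × Int × String)) :
    ∀ open_t count, goMeasure pid records open_t count = goMeasure' (flipOf pid records) open_t count := by
  induction records with
  | nil => intro o c; rfl
  | cons r rest ih =>
    obtain ⟨t, p, ev⟩ := r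
    intro o c
    rw [flipOf_cons]
    by_cases hp : p = pid
    · rw [if_pos hp, goMeasure.eq_def, goMeasure'.eq_def]
      dsimp only
      rw [if_neg (by simp [hp] : ¬(p ≠ pid))]
      split_ifs with h1 h2
      · exact ih _ _
      · cases o with
        | none => exact ih _ _
        | some v =>
          dsimp only
          split_ifs with h3
          · rfl
          · exact ih _ _
      · exact ih _ _
    · rw [if_neg hp, goMeasure.eq_def]
      dsimp only
      rw [if_pos hp]
      exact ih _ _

theorem goPre_fuse (pid : Int) (records : List (Int × Int × String)) :
    ∀ saw, goPre pid records saw = goPre' (flipOf pid records) saw := by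
  induction records with
  | nil => intro saw; rfl
  | cons r rest ih =>
    obtain ⟨t, p, ev⟩ := r
    intro saw
    rw [flipOf_cons]
    by_cases hp : p = pid
    · rw [if_pos hp, goPre.eq_def, goPre'.eq_def]
      dsimp only
      rw [if_neg (by simp [hp] : ¬(p ≠ pid))]
      split_ifs with h1 h2
      · exact ih _
      · exact goMeasure_fuse pid rest none 0
      · exact ih _
    · rw [if_neg hp, goPre.eq_def]
      dsimp only
      rw [if_pos hp]
      exact ih _

theorem burstsLoop_acc (xs : List (Int × String)) :
    ∀ o acc, burstsLoop xs o acc = acc ++ burstsLoop xs o [] := by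
  induction xs with
  | nil => intro o acc; simp [burstsLoop]
  | cons x rest ih =>
    obtain ⟨t, ev⟩ := x
    intro o acc
    rw [burstsLoop.eq_def, burstsLoop.eq_def]
    dsimp only
    split_ifs with h1 h2
    · rw [ih (some t) acc]
    · cases o with
      | some v =>
        dsimp only
        rw [ih none (acc ++ [t - v]), List.nil_append, ih none [t - v]]
        simp
      | none => exact ih none acc
    · exact ih o acc

theorem firstLong_cons (b : Int) (rest : List Int) (i : Int) :
    firstLong (b :: rest) i = if b ≥ 5 then (some (i + 1), some b) else firstLong rest (i + 1) := rfl

theorem goMeasure'_spec (xs : List (Int × String)) :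
    ∀ o c, goMeasure' xs o c = firstLong (burstsLoop xs o []) c := by
  induction xs with
  | nil => intro o c; rfl
  | cons x rest ih =>
    obtain ⟨t, ev⟩ := x
    intro o c
    rw [goMeasure'.eq_def, burstsLoop.eq_def]
    dsimp only
    split_ifs with h1 h2
    · exact ih _ _
    · cases o with
      | some v =>
        try dsimp only
        rw [List.nil_append, burstsLoop_acc rest none [t - v], List.singleton_append, firstLong_cons]
        split_ifs with h3
        · rfl
        · exact ih _ _
      | none => exact ih _ _
    · exact ih _ _

theorem findChange_shift (xs : List (Int × String)) :
    ∀ saw i, findChange xs i saw = (findChange xs 0 saw).map (fun j => i + j) := by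
  induction xs with
  | nil => intro saw i; rfl
  | cons x rest ih =>
    obtain ⟨t, ev⟩ := x
    intro saw i
    rw [findChange, findChange]
    split_ifs
    · rw [ih true (i + 1), ih true 1]; cases findChange rest 0 true <;> simp; omega
    · simp
    · rw [ih saw (i + 1), ih saw 1]; cases findChange rest 0 saw <;> simp; omega

theorem burstsLoop_preempt (t : Int) (rest : List (Int × String)) (acc : List Int) :
    burstsLoop ((t, "PREEMPT") :: rest) none acc = burstsLoop rest none acc := by
  simp [burstsLoop]

theorem goPre'_spec (xs : List (Int × String)) :
    ∀ saw, goPre' xs saw =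
      match findChange xs 0 saw with
      | none => (none, none)
      | some ci => firstLong (burstsLoop (xs.drop ci) none []) 0 := by
  induction xs with
  | nil => intro saw; rfl
  | cons x rest ih =>
    obtain ⟨t, ev⟩ := x
    intro saw
    rw [goPre'.eq_def, findChange.eq_def]
    dsimp only
    split_ifs with h1 h2
    · rw [ih true, findChange_shift rest true 1]
      cases hfc : findChange rest 0 true with
      | none => rfl
      | some j =>
        simp only [Option.map_some]
        rw [Nat.add_comm 1 j, List.drop_succ_cons]
    · rw [goMeasure'_spec rest none 0]
      show firstLong (burstsLoop rest none []) 0 = firstLong (burstsLoop ((t, ev) :: rest) none []) 0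
      rw [h2.1, burstsLoop_preempt]
    · rw [ih saw, findChange_shift rest saw 1]
      cases hfc : findChange rest 0 saw with
      | none => rfl
      | some j =>
        simp only [Option.map_some]
        rw [Nat.add_comm 1 j, List.drop_succ_cons]

-- ===== VERDICT (by name: the statement is the Claim_ definition above) =====
theorem adaptation_metrics_spec : Claim_equal_adaptation_metrics := by
  intro records _
  unfold Spec_adaptation_metrics adaptation_metrics adaptation_metrics_alt
  rw [← workload_pid_eq]
  cases h : workload_pid records with
  | none => rfl
  | some pid =>
    simp only
    rw [goPre_fuse pid records false, goPre'_spec]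
    rfl
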